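-- pv_equiv track=rewrite | github.com/ronitchugwani/Dynacool | data_cleaning.py | _find_best_column
-- ===== SOURCE A (Python) =====
-- from typing import Optional
--
-- def _find_best_column(
--     columns: list[str],
--     include_keywords: list[str],
--     preferred_keywords: Optional[list[str]] = None,
--     exclude_keywords: Optional[list[str]] = None,
-- ) -> Optional[str]:
--     """Score columns by keyword matches and return the strongest candidate."""
--     preferred_keywords = preferred_keywords or []
--     exclude_keywords = exclude_keywords or []
--
--     for preferred in preferred_keywords:
--         exact = [col for col in columns if col == preferred]
--         if exact:
--             return exact[0]
--
--     candidates: list[tuple[int, str]] = []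
--     for col in columns:
--         if any(token in col for token in exclude_keywords):
--             continue
--
--         score = sum(1 for token in include_keywords if token in col)
--         if score > 0:
--             candidates.append((score, col))
--
--     if not candidates:
--         return None
--
--     candidates.sort(key=lambda item: (item[0], len(item[1])), reverse=True)
--     return candidates[0][1]
-- ===== SOURCE B (Python) =====
-- from typing import Optional
--
-- def _find_best_column(
--     columns: list,
--     include_keywords: list,
--     preferred_keywords=None,
--     exclude_keywords=None,
-- ):
--     """Single-pass selection of the strongest column: no candidate list, no sort."""
--     for preferred in (preferred_keywords or []):
--         if preferred in columns:
--             return preferred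
--
--     exclude_keywords = exclude_keywords or []
--     best_col = None
--     best_key = None
--     for col in columns:
--         if any(token in col for token in exclude_keywords):
--             continue
--         score = sum(1 for token in include_keywords if token in col)
--         if score > 0:
--             key = (score, len(col))
--             if best_key is None or key > best_key:
--                 best_key = key
--                 best_col = col
--     return best_col
-- ===== Notes on version B (the rewrite author's own statement) =====
-- stated objective: alternative
-- what changed: Replaces the candidate-list build plus stable reverse sort with a single linear scan that keeps the running best (score, len) key under strict lexicographic comparison, and replaces the preferred-exact-match filter with a direct membership test.
import Mathlib
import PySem

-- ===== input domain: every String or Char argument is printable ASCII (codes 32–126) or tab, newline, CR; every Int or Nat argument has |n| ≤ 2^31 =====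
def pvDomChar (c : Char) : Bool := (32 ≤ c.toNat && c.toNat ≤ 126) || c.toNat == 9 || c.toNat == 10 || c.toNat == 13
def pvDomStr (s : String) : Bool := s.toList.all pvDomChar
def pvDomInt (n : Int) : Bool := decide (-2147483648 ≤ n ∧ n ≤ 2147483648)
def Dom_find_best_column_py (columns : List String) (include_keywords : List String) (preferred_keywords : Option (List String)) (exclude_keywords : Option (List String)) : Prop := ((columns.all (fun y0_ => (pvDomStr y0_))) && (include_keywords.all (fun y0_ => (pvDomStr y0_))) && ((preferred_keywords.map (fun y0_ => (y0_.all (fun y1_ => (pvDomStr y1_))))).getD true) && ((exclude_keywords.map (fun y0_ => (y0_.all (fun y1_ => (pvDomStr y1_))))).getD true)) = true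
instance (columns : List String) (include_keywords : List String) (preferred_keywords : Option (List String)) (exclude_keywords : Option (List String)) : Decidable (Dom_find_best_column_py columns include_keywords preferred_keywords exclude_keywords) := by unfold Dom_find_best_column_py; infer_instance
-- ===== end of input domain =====

-- ===== PORT A =====
-- B replaces A's candidate list + stable reverse sort by a one-pass running-best scan (see claim).
def findBestPrefLoopA (columns : List String) : List String → Option String
  | [] => none
  | p :: rest =>
    match columns.filter (fun col => col == p) with
    | e :: _ => some e
    | [] => findBestPrefLoopA columns rest

def find_best_column_py (columns : List String) (include_keywords : List String) (preferred_keywords : Option (List String)) (exclude_keywords : Option (List String)) : Option String :=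
  let preferred := preferred_keywords.getD []
  let exclude := exclude_keywords.getD []
  match findBestPrefLoopA columns preferred with
  | some c => some c
  | none =>
    let candidates : List (Int × String) := columns.foldl (fun acc col =>
      if exclude.any (fun token => PySem.Str.isIn token col) then acc
      else
        let score : Int := include_keywords.foldl (fun s token => if PySem.Str.isIn token col then s + 1 else s) 0
        if score > 0 then acc ++ [(score, col)] else acc) []
    if candidates = [] then none
    else
      match PySem.List.sorted2 candidates (fun item => item.1) (fun item => PySem.Str.len item.2) true with
      | [] => none
      | item :: _ => some item.2

-- ===== PORT B =====
def find_best_column_py_alt (columns : List String) (include_keywords : List String) (preferred_keywords : Option (List String)) (exclude_keywords : Option (List String)) : Option String :=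
  let preferred := preferred_keywords.getD []
  let exclude := exclude_keywords.getD []
  match preferred.find? (fun p => columns.contains p) with
  | some p => some p
  | none =>
    let best : Option (Int × Int × String) := columns.foldl (fun best col =>
      if exclude.any (fun token => PySem.Str.isIn token col) then best
      else
        let score : Int := include_keywords.foldl (fun s token => if PySem.Str.isIn token col then s + 1 else s) 0
        if score > 0 then
          match best with
          | none => some (score, PySem.Str.len col, col)
          | some (s0, l0, _) =>
            if score > s0 ∨ (score = s0 ∧ PySem.Str.len col > l0) then some (score, PySem.Str.len col, col)
            else best
        else best) none
    best.map (fun b => b.2.2)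

-- ===== PRECONDITION & SPEC =====
def Spec_find_best_column_py (columns : List String) (include_keywords : List String) (preferred_keywords : Option (List String)) (exclude_keywords : Option (List String)) (out : Option String) : Prop := out = find_best_column_py_alt columns include_keywords preferred_keywords exclude_keywords
instance (columns : List String) (include_keywords : List String) (preferred_keywords : Option (List String)) (exclude_keywords : Option (List String)) (out : Option String) : Decidable (Spec_find_best_column_py columns include_keywords preferred_keywords exclude_keywords out) := by unfold Spec_find_best_column_py; infer_instance

-- ===== CLAIM (what is proved, stated in full; the proofs are below) =====
def Claim_equal_find_best_column_py : Prop := ∀ (columns : List String) (include_keywords : List String) (preferred_keywords : Option (List String)) (exclude_keywords : Option (List String)), Dom_find_best_column_py columns include_keywords preferred_keywords exclude_keywords → Spec_find_best_column_py columns include_keywords preferred_keywords exclude_keywords (find_best_column_py columns include_keywords preferred_keywords exclude_keywords)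

-- ===== LEMMAS AND PROOFS =====

-- helper names used only by the proofs
def pvScore (inc : List String) (col : String) : Int :=
  inc.foldl (fun s token => if PySem.Str.isIn token col then s + 1 else s) 0

def pvQ (inc exclude : List String) (col : String) : Option (Int × String) :=
  if exclude.any (fun token => PySem.Str.isIn token col) then none
  else if pvScore inc col > 0 then some (pvScore inc col, col) else none

def pvBefore (x y : Int × String) : Bool :=
  decide (y.1 < x.1) || (!decide (x.1 < y.1) && decide (PySem.Str.len y.2 < PySem.Str.len x.2))

def pvUpd (b : Option (Int × String)) (x : Int × String) : Option (Int × String) :=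
  match b with
  | none => some x
  | some y => if pvBefore x y then some x else some y

def pvPsi (p : Int × String) : Int × Int × String := (p.1, PySem.Str.len p.2, p.2)

theorem pref_loop_eq (columns : List String) : ∀ pref : List String,
    findBestPrefLoopA columns pref = pref.find? (fun p => columns.contains p) := by
  intro pref
  induction pref with
  | nil => rfl
  | cons p rest ih =>
    cases h : columns.filter (fun col => col == p) with
    | nil =>
      have hp : p ∉ columns := by
        simp only [List.filter_eq_nil_iff] at h
        intro hmem
        have := h p hmem
        simp at this
      simp [findBestPrefLoopA, h, hp, ih]
    | cons e t =>
      have hmem : e ∈ columns.filter (fun col => col == p) := by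
        rw [h]; exact List.mem_cons_self
      have he : e = p := by
        have := List.of_mem_filter hmem
        simpa using this
      have hp : p ∈ columns := by
        have : e ∈ columns := List.mem_of_mem_filter hmem
        rwa [he] at this
      simp [findBestPrefLoopA, h, hp, he]

theorem head?_insertBy {α : Type} (before : α → α → Bool) (x : α) (acc : List α) :
    (PySem.List.insertBy before x acc).head? =
      some (match acc with | [] => x | y :: _ => if before x y then x else y) := by
  cases acc with
  | nil => simp [PySem.List.insertBy]
  | cons y ys => cases hb : before x y <;> simp [PySem.List.insertBy, hb]

theorem head?_foldl_insertBy : ∀ (L acc : List (Int × String)),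
    (L.foldl (fun acc x => PySem.List.insertBy pvBefore x acc) acc).head? = L.foldl pvUpd acc.head? := by
  intro L
  induction L with
  | nil => intro acc; rfl
  | cons x L ih =>
    intro acc
    simp only [List.foldl_cons]
    rw [ih]
    congr 1
    rw [head?_insertBy]
    cases acc with
    | nil => rfl
    | cons y ys =>
      rw [List.head?_cons]
      show some (if pvBefore x y = true then x else y) = if pvBefore x y = true then some x else some y
      split <;> rfl

theorem cand_build_eq (inc exclude : List String) : ∀ (cols : List String) (acc : List (Int × String)),
    cols.foldl (fun acc col =>
      if exclude.any (fun token => PySem.Str.isIn token col) then acc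
      else
        if (inc.foldl (fun s token => if PySem.Str.isIn token col then s + 1 else s) 0 : Int) > 0 then
          acc ++ [(inc.foldl (fun s token => if PySem.Str.isIn token col then s + 1 else s) 0, col)]
        else acc) acc
    = acc ++ cols.filterMap (pvQ inc exclude) := by
  intro cols
  induction cols with
  | nil => intro acc; simp
  | cons col cols ih =>
    intro acc
    simp only [List.foldl_cons, List.filterMap_cons]
    by_cases hex : (exclude.any fun token => PySem.Str.isIn token col) = true
    · have hq : pvQ inc exclude col = none := by
        unfold pvQ; rw [if_pos hex]
      rw [hq, if_pos hex, ih]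
    · by_cases hs : pvScore inc col > 0
      · have hq : pvQ inc exclude col = some (pvScore inc col, col) := by
          unfold pvQ; rw [if_neg hex, if_pos hs]
        have hs' : (inc.foldl (fun s token => if PySem.Str.isIn token col then s + 1 else s) 0 : Int) > 0 := hs
        rw [hq, if_neg hex, if_pos hs', ih]
        simp [pvScore, PySem.Str.isIn]
      · have hq : pvQ inc exclude col = none := by
          unfold pvQ; rw [if_neg hex, if_neg hs]
        have hs' : ¬ ((inc.foldl (fun s token => if PySem.Str.isIn token col then s + 1 else s) 0 : Int) > 0) := hs
        rw [hq, if_neg hex, if_neg hs', ih]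

theorem b_fold_eq (inc exclude : List String) : ∀ (cols : List String) (b : Option (Int × String)),
    cols.foldl (fun best col =>
      if exclude.any (fun token => PySem.Str.isIn token col) then best
      else
        if (inc.foldl (fun s token => if PySem.Str.isIn token col then s + 1 else s) 0 : Int) > 0 then
          match best with
          | none => some (inc.foldl (fun s token => if PySem.Str.isIn token col then s + 1 else s) 0, PySem.Str.len col, col)
          | some (s0, l0, _) =>
            if (inc.foldl (fun s token => if PySem.Str.isIn token col then s + 1 else s) 0 : Int) > s0
                ∨ ((inc.foldl (fun s token => if PySem.Str.isIn token col then s + 1 else s) 0 : Int) = s0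
                    ∧ PySem.Str.len col > l0) then
              some (inc.foldl (fun s token => if PySem.Str.isIn token col then s + 1 else s) 0, PySem.Str.len col, col)
            else best
        else best) (b.map pvPsi)
    = (cols.foldl (fun b col => match pvQ inc exclude col with | none => b | some x => pvUpd b x) b).map pvPsi := by
  intro cols
  induction cols with
  | nil => intro b; rfl
  | cons col cols ih =>
    intro b
    simp only [List.foldl_cons]
    by_cases hex : (exclude.any fun token => PySem.Str.isIn token col) = true
    · have hq : pvQ inc exclude col = none := by unfold pvQ; rw [if_pos hex]
      rw [if_pos hex, hq]
      exact ih b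
    · by_cases hs : pvScore inc col > 0
      · have hq : pvQ inc exclude col = some (pvScore inc col, col) := by
          unfold pvQ; rw [if_neg hex, if_pos hs]
        have hs' : (inc.foldl (fun s token => if PySem.Str.isIn token col then s + 1 else s) 0 : Int) > 0 := hs
        rw [if_neg hex, hq, if_pos hs']
        cases b with
        | none => exact ih (some (pvScore inc col, col))
        | some y =>
          obtain ⟨s0, c0⟩ := y
          simp only [Option.map_some, pvPsi]
          have hcond : ((inc.foldl (fun s token => if PySem.Str.isIn token col then s + 1 else s) 0 : Int) > s0
              ∨ ((inc.foldl (fun s token => if PySem.Str.isIn token col then s + 1 else s) 0 : Int) = s0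
                  ∧ PySem.Str.len col > PySem.Str.len c0))
              ↔ pvBefore (pvScore inc col, col) (s0, c0) = true := by
            simp only [pvBefore, pvScore, Bool.or_eq_true, Bool.and_eq_true, Bool.not_eq_true',
              decide_eq_true_eq, decide_eq_false_iff_not]
            omega
          by_cases hc : (inc.foldl (fun s token => if PySem.Str.isIn token col then s + 1 else s) 0 : Int) > s0
              ∨ ((inc.foldl (fun s token => if PySem.Str.isIn token col then s + 1 else s) 0 : Int) = s0
                  ∧ PySem.Str.len col > PySem.Str.len c0)
          · have hb : pvBefore (pvScore inc col, col) (s0, c0) = true := hcond.mp hc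
            rw [if_pos hc]
            have hrhs : pvUpd (some (s0, c0)) (pvScore inc col, col) = some (pvScore inc col, col) := by
              show (if pvBefore (pvScore inc col, col) (s0, c0) = true then some (pvScore inc col, col)
                else some (s0, c0)) = some (pvScore inc col, col)
              rw [if_pos hb]
            rw [hrhs]
            exact ih (some (pvScore inc col, col))
          · have hb : ¬ pvBefore (pvScore inc col, col) (s0, c0) = true := fun h => hc (hcond.mpr h)
            rw [if_neg hc]
            have hrhs : pvUpd (some (s0, c0)) (pvScore inc col, col) = some (s0, c0) := by
              show (if pvBefore (pvScore inc col, col) (s0, c0) = true then some (pvScore inc col, col)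
                else some (s0, c0)) = some (s0, c0)
              rw [if_neg hb]
            rw [hrhs]
            exact ih (some (s0, c0))
      · have hq : pvQ inc exclude col = none := by
          unfold pvQ; rw [if_neg hex, if_neg hs]
        have hs' : ¬ ((inc.foldl (fun s token => if PySem.Str.isIn token col then s + 1 else s) 0 : Int) > 0) := hs
        rw [if_neg hex, hq, if_neg hs']
        exact ih b

theorem foldl_pvQ (inc exclude : List String) : ∀ (cols : List String) (b : Option (Int × String)),
    (cols.filterMap (pvQ inc exclude)).foldl pvUpd b
    = cols.foldl (fun b col => match pvQ inc exclude col with | none => b | some x => pvUpd b x) b := by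
  intro cols
  induction cols with
  | nil => intro b; rfl
  | cons col cols ih =>
    intro b
    cases hq : pvQ inc exclude col <;> simp [hq, ih]

-- ===== VERDICT (by name: the statement is the Claim_ definition above) =====
theorem find_best_column_py_spec : Claim_equal_find_best_column_py := by
  intro cols inc pref excl _
  unfold Spec_find_best_column_py find_best_column_py find_best_column_py_alt
  simp only []
  rw [pref_loop_eq]
  cases hf : List.find? (fun p => cols.contains p) (pref.getD []) with
  | some c => rfl
  | none =>
    rw [cand_build_eq inc (excl.getD []) cols [], List.nil_append]
    have hB := b_fold_eq inc (excl.getD []) cols none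
    simp only [Option.map_none] at hB
    rw [hB, ← foldl_pvQ]
    by_cases hF : cols.filterMap (pvQ inc (excl.getD [])) = []
    · rw [if_pos hF, hF]
      rfl
    · rw [if_neg hF]
      cases hs2 : PySem.List.sorted2 (cols.filterMap (pvQ inc (excl.getD [])))
          (fun item => item.1) (fun item => PySem.Str.len item.2) true with
      | nil =>
        exfalso
        have hperm := PySem.List.sorted2_perm (cols.filterMap (pvQ inc (excl.getD [])))
          (fun item => item.1) (fun item => PySem.Str.len item.2) true
        rw [hs2] at hperm
        exact hF hperm.nil_eq.symm
      | cons item rest =>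
        have hkey : (PySem.List.sorted2 (cols.filterMap (pvQ inc (excl.getD [])))
            (fun item => item.1) (fun item => PySem.Str.len item.2) true).head?
            = (cols.filterMap (pvQ inc (excl.getD []))).foldl pvUpd none := by
          rw [show PySem.List.sorted2 (cols.filterMap (pvQ inc (excl.getD [])))
              (fun item => item.1) (fun item => PySem.Str.len item.2) true
            = (cols.filterMap (pvQ inc (excl.getD []))).foldl
                (fun acc x => PySem.List.insertBy pvBefore x acc) [] from rfl]
          exact head?_foldl_insertBy (cols.filterMap (pvQ inc (excl.getD []))) []
        rw [hs2] at hkey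
        rw [← hkey]
        rfl
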